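-- pv_equiv track=rewrite | github.com/hodacthanhminh/ABAC-SE-Scheme | search.py | orQuery
-- ===== SOURCE A (Python) =====
-- def orQuery(matrix):
--     result = 0
--     for i in matrix:
--         row = 0
--         for j in i:
--             row = row or j
--         result = result or row
--     return result
-- ===== SOURCE B (Python) =====
-- def orQuery(matrix):
--     return next((j for row in matrix for j in row if j != 0), 0)
-- ===== Notes on version B (the rewrite author's own statement) =====
-- stated objective: simpler
-- what changed: Replaces the two-level or-fold with a single pass over the flattened element stream returning the first nonzero element (default 0), with early exit.
import Mathlib
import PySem

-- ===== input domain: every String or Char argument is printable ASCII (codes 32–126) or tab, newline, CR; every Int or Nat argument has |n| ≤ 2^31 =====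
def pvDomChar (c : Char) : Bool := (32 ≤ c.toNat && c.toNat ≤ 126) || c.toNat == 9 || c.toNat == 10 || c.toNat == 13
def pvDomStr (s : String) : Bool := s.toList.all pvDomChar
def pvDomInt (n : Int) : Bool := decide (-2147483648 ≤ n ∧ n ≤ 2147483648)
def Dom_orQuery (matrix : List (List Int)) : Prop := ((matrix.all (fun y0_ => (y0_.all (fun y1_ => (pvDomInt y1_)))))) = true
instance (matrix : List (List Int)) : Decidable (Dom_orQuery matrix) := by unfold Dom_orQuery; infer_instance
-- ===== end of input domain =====

-- ===== PORT A =====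
-- Python 'x or y' on ints: x if x truthy (nonzero) else y
def pyOr (x y : Int) : Int := if x ≠ 0 then x else y

def orQuery (matrix : List (List Int)) : Int :=
  matrix.foldl (fun result i => pyOr result (i.foldl pyOr 0)) 0

-- ===== PORT B =====
-- first nonzero element of the flattened matrix, default 0
def orQuery_alt (matrix : List (List Int)) : Int :=
  ((matrix.flatMap id).find? (fun j => j ≠ 0)).getD 0

-- ===== PRECONDITION & SPEC =====
def Spec_orQuery (matrix : List (List Int)) (out : Int) : Prop := out = orQuery_alt matrix
instance (matrix : List (List Int)) (out : Int) : Decidable (Spec_orQuery matrix out) := by unfold Spec_orQuery; infer_instance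

-- ===== CLAIM (what is proved, stated in full; the proofs are below) =====
def Claim_equal_orQuery : Prop := ∀ (matrix : List (List Int)), Dom_orQuery matrix → Spec_orQuery matrix (orQuery matrix)

-- ===== LEMMAS AND PROOFS =====

-- ===== VERDICT (by name: the statement is the Claim_ definition above) =====
-- a pyOr-fold from acc: keeps acc if nonzero, else first nonzero of the list, else 0
theorem foldl_pyOr (l : List Int) (acc : Int) :
    l.foldl pyOr acc = if acc ≠ 0 then acc else (l.find? (fun j => j ≠ 0)).getD 0 := by
  induction l generalizing acc with
  | nil => simp [pyOr]
  | cons a t ih =>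
    simp only [List.foldl_cons, ih, List.find?]
    by_cases ha : acc = 0 <;> by_cases h : a = 0 <;> simp [pyOr, ha, h]

-- the outer fold from acc: acc if nonzero, else first nonzero of the flattened tail
theorem outer_fold (t : List (List Int)) (acc : Int) :
    t.foldl (fun result i => pyOr result (i.foldl pyOr 0)) acc
      = if acc ≠ 0 then acc else ((t.flatMap id).find? (fun j => j ≠ 0)).getD 0 := by
  induction t generalizing acc with
  | nil => simp
  | cons r t ih =>
    rw [List.foldl_cons, ih, foldl_pyOr]
    simp only [List.flatMap_cons, id, List.find?_append]
    by_cases ha : acc = 0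
    · cases hr : List.find? (fun j => j ≠ 0) r with
      | none => simp [pyOr, ha]
      | some v =>
        have hv : v ≠ 0 := by simpa using List.find?_some hr
        simp [pyOr, ha, hv]
    · simp [pyOr, ha]

theorem orQuery_eq (matrix : List (List Int)) :
    orQuery matrix = orQuery_alt matrix := by
  unfold orQuery orQuery_alt
  simp [outer_fold]

theorem orQuery_spec : Claim_equal_orQuery := by
  intro m _
  unfold Spec_orQuery
  exact orQuery_eq m
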